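-- pv_equiv track=rewrite | github.com/YamilaTimmer/gene-rearrangement-simulation | gene_rearrangement_simulation.py | p_addition
-- ===== SOURCE A (Python) =====
-- def p_addition(cluster_sequences):
--     """
--
--     :param cluster_sequences: (list) The sequences of the clusters (D, V, J) after n_addition.
--     :return: cluster_sequences: (list) The sequences of the clusters (D, V, J) after p_addition.
--     """
--     nucleotide_dict = {"A": "T", "C": "G", "T": "A", "G": "C"}
--
--     for i in range(len(cluster_sequences)):
--
--         # Make "palindrome" and invert it, so that it can properly be appended
--         palindrome_nucleotides = (nucleotide_dict[cluster_sequences[i][-2]] + nucleotide_dict[cluster_sequences[i][-1]])[::-1]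
--         cluster_sequences[i] += palindrome_nucleotides
--
--     for i in range(len(cluster_sequences)):
--         # Make "palindrome" and invert it, so that it can properly be appended
--         palindrome_nucleotides = (nucleotide_dict[cluster_sequences[i][-2]] + nucleotide_dict[cluster_sequences[i][-1]])[::-1]
--         cluster_sequences[i] = palindrome_nucleotides + cluster_sequences[i]
--
--     return cluster_sequences
-- ===== SOURCE B (Python) =====
-- def p_addition(cluster_sequences):
--     """Single fused in-place pass: prepend the original last pair and append its
--     reversed complement directly, instead of A's two complement passes."""
--     nucleotide_dict = {"A": "T", "C": "G", "T": "A", "G": "C"}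
--     for i in range(len(cluster_sequences)):
--         seq = cluster_sequences[i]
--         a, b = seq[-2], seq[-1]
--         cluster_sequences[i] = a + b + seq + nucleotide_dict[b] + nucleotide_dict[a]
--     return cluster_sequences
-- ===== Notes on version B (the rewrite author's own statement) =====
-- stated objective: simpler
-- what changed: Replaces A's two full passes (append reversed complement, then prepend reversed complement of the new tail) with one fused pass that prepends the original last two characters and appends their reversed complement directly, using only two dict lookups per sequence.
import Mathlib
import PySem

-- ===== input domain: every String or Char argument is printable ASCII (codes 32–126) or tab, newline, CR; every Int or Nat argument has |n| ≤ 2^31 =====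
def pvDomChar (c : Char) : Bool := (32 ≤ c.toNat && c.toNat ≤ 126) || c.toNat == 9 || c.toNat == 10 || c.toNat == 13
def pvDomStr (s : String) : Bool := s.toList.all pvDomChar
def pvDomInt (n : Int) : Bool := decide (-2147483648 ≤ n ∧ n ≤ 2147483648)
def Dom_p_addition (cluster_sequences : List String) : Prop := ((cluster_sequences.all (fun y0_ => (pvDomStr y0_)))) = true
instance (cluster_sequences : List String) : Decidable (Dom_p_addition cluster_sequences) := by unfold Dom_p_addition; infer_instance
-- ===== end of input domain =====

-- B fuses A's two complement passes into one in-place pass: prepend the original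
-- last pair and append its reversed complement directly (simpler decomposition;
-- both A and B mutate the list in place in Python — equivalence is about the return value).


-- ===== PORT A =====
-- nucleotide_dict = {"A": "T", "C": "G", "T": "A", "G": "C"}; under Pre_ every lookup hits,
-- so the KeyError/IndexError cases (none) are replaced by a default never used inside Pre_.
def pvNd : PySem.Dict Char Char := PySem.Dict.ofList [('A','T'),('C','G'),('T','A'),('G','C')]

def pvComp (c : Char) : Char := pvNd.getD c ' '

-- first loop body: seq += (nd[seq[-2]] + nd[seq[-1]])[::-1]
def pvPass1 (s : String) : String :=
  String.ofList (s.toList ++ ([pvComp (PySem.List.pyGetD s.toList (-2) ' '),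
                           pvComp (PySem.List.pyGetD s.toList (-1) ' ')]).reverse)

-- second loop body: seq = (nd[seq[-2]] + nd[seq[-1]])[::-1] + seq
def pvPass2 (s : String) : String :=
  String.ofList (([pvComp (PySem.List.pyGetD s.toList (-2) ' '),
               pvComp (PySem.List.pyGetD s.toList (-1) ' ')]).reverse ++ s.toList)

def p_addition (cluster_sequences : List String) : List String :=
  (cluster_sequences.map pvPass1).map pvPass2

-- ===== PORT B =====
-- one fused pass: a+b+seq+nd[b]+nd[a]
def p_addition_alt (cluster_sequences : List String) : List String :=
  cluster_sequences.map (fun s =>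
    let cs := s.toList
    let a := PySem.List.pyGetD cs (-2) ' '
    let b := PySem.List.pyGetD cs (-1) ' '
    String.ofList (a :: b :: cs ++ [pvComp b, pvComp a]))

-- ===== PRECONDITION & SPEC =====
-- Pre_ excludes exactly the inputs where Python A raises: a sequence shorter than 2
-- (IndexError on seq[-2]) or whose last two characters are not A/C/T/G (KeyError).
def Pre_p_addition (cluster_sequences : List String) : Prop :=
  ∀ s ∈ cluster_sequences, 2 ≤ s.toList.length ∧
    PySem.List.pyGetD s.toList (-2) ' ' ∈ ['A','C','T','G'] ∧
    PySem.List.pyGetD s.toList (-1) ' ' ∈ ['A','C','T','G']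

instance (cluster_sequences : List String) : Decidable (Pre_p_addition cluster_sequences) := by
  unfold Pre_p_addition; infer_instance

def pvWitness_p_addition : List String := ["AC", "GGT"]

def Spec_p_addition (cluster_sequences : List String) (out : List String) : Prop := out = p_addition_alt cluster_sequences
instance (cluster_sequences : List String) (out : List String) : Decidable (Spec_p_addition cluster_sequences out) := by unfold Spec_p_addition; infer_instance

-- ===== CLAIM (what is proved, stated in full; the proofs are below) =====
def Claim_equal_p_addition : Prop := ∀ (cluster_sequences : List String), Dom_p_addition cluster_sequences → Pre_p_addition cluster_sequences → Spec_p_addition cluster_sequences (p_addition cluster_sequences)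

-- ===== LEMMAS AND PROOFS =====

theorem pvComp_comp {c : Char} (h : c ∈ ['A','C','T','G']) : pvComp (pvComp c) = c := by
  fin_cases h <;> decide

theorem pyGetD_append_pair_neg_two {l : List Char} (x y d : Char) :
    PySem.List.pyGetD (l ++ [x, y]) (-2) d = x := by
  rw [PySem.List.pyGetD_neg_ofNat (l ++ [x, y]) 2 d (by omega) (by simp)]
  simp

theorem pyGetD_append_pair_neg_one {l : List Char} (x y d : Char) :
    PySem.List.pyGetD (l ++ [x, y]) (-1) d = y := by
  rw [PySem.List.pyGetD_neg_ofNat (l ++ [x, y]) 1 d (by omega) (by simp)]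
  simp

theorem pvPass_fuse (s : String)
    (ha : PySem.List.pyGetD s.toList (-2) ' ' ∈ ['A','C','T','G'])
    (hb : PySem.List.pyGetD s.toList (-1) ' ' ∈ ['A','C','T','G']) :
    pvPass2 (pvPass1 s) =
      String.ofList (PySem.List.pyGetD s.toList (-2) ' ' :: PySem.List.pyGetD s.toList (-1) ' ' ::
        s.toList ++ [pvComp (PySem.List.pyGetD s.toList (-1) ' '),
                     pvComp (PySem.List.pyGetD s.toList (-2) ' ')]) := by
  set a := PySem.List.pyGetD s.toList (-2) ' ' with hadef
  set b := PySem.List.pyGetD s.toList (-1) ' ' with hbdef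
  show pvPass2 (String.ofList (s.toList ++ [pvComp b, pvComp a])) = _
  unfold pvPass2
  have hl : (String.ofList (s.toList ++ [pvComp b, pvComp a])).toList
      = s.toList ++ [pvComp b, pvComp a] := by simp
  rw [hl, pyGetD_append_pair_neg_two, pyGetD_append_pair_neg_one,
      pvComp_comp ha, pvComp_comp hb]
  simp

-- ===== VERDICT (by name: the statement is the Claim_ definition above) =====
theorem p_addition_spec : Claim_equal_p_addition := by
  intro xs _ hpre
  unfold Spec_p_addition p_addition p_addition_alt
  rw [List.map_map]
  apply List.map_congr_left
  intro s hs
  obtain ⟨_, ha, hb⟩ := hpre s hs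
  simpa using pvPass_fuse s ha hb
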